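-- pv_equiv track=rewrite | github.com/NeoBryant/Leetcode_test | 全部/5.py | getSingleStr
-- ===== SOURCE A (Python) =====
-- def getSingleStr(s, i): # 得到对应奇数点的最长中心扩散回文串
--     ns = s[i]
--     j = 1
--     while (i-j >= 0 and i+j < len(s)):
--         if s[i-j] == s[i+j]:
--             ns = s[i-j] + ns + s[i+j]
--             j += 1
--         else:
--             break
--     return ns
-- ===== SOURCE B (Python) =====
-- def getSingleStr(s, i):  # expand a radius with index comparisons, return center plus two slices
--     n = len(s)
--     r = 0
--     while i - r - 1 >= 0 and i + r + 1 < n and s[i - r - 1] == s[i + r + 1]: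
--         r += 1
--     return s[i - r:i] + s[i] + s[i + 1:i + r + 1]
-- ===== Notes on version B (the rewrite author's own statement) =====
-- stated objective: faster
-- what changed: A grows the palindrome by string concatenation at every expansion step; B only expands an integer radius with index comparisons and assembles the result once at the end as left slice + center + right slice.
import Mathlib
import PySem

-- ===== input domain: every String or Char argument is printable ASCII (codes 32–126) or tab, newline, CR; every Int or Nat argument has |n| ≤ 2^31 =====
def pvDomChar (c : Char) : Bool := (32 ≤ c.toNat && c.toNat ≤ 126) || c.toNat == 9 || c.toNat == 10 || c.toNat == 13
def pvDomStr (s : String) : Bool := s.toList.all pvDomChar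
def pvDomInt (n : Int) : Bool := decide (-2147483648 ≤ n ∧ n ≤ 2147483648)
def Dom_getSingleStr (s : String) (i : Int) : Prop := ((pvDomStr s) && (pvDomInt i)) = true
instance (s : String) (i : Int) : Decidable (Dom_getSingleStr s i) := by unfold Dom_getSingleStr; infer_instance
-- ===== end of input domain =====

-- B replaces A's per-step string concatenation by expanding an integer radius and
-- joining the center with two slices at the end (faster: no quadratic string building).


-- ===== PORT A =====
-- while (i-j >= 0 and i+j < len(s)): if s[i-j] == s[i+j]: ns = s[i-j] + ns + s[i+j]; j += 1 else break
-- (fuel = len(s) bounds the loop: each iteration needs i + j < len(s) and j increases)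
def pvLoopA (cs : List Char) (i : Int) : Nat → Int → List Char → List Char
  | 0, _, ns => ns
  | fuel+1, j, ns =>
    if i - j ≥ 0 ∧ i + j < (cs.length : Int) then
      match PySem.List.pyGet? cs (i - j), PySem.List.pyGet? cs (i + j) with
      | some a, some b => if a = b then pvLoopA cs i fuel (j + 1) (a :: (ns ++ [b])) else ns
      | _, _ => ns    -- unreachable: both indices are in range under the guard
    else ns

def getSingleStr (s : String) (i : Int) : String :=
  match PySem.Str.pyGet? s i with
  | none => ""        -- Python raises IndexError here; excluded by Pre_getSingleStr
  | some c => String.ofList (pvLoopA s.toList i s.toList.length 1 [c])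

-- ===== PORT B =====
-- while i-r-1 >= 0 and i+r+1 < n and s[i-r-1] == s[i+r+1]: r += 1; return s[i-r:i] + s[i] + s[i+1:i+r+1]
def pvLoopB (cs : List Char) (i : Int) : Nat → Int → Int
  | 0, r => r
  | fuel+1, r =>
    if i - r - 1 ≥ 0 ∧ i + r + 1 < (cs.length : Int) ∧
       PySem.List.pyGet? cs (i - r - 1) = PySem.List.pyGet? cs (i + r + 1) then
      pvLoopB cs i fuel (r + 1)
    else r

def getSingleStr_alt (s : String) (i : Int) : String :=
  let cs := s.toList
  let r := pvLoopB cs i cs.length 0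
  match PySem.Str.pyGet? s i with
  | none => ""        -- Python raises IndexError at s[i]; excluded by Pre_getSingleStr
  | some c =>
      String.ofList (PySem.List.slice cs (some (i - r)) (some i) ++ [c] ++
                     PySem.List.slice cs (some (i + 1)) (some (i + r + 1)))

-- ===== PRECONDITION & SPEC =====
-- Pre_ excludes exactly the inputs where both Pythons raise IndexError at s[i]: i < -len(s) or i >= len(s).
def Pre_getSingleStr (s : String) (i : Int) : Prop :=
  -(s.toList.length : Int) ≤ i ∧ i < (s.toList.length : Int)
instance (s : String) (i : Int) : Decidable (Pre_getSingleStr s i) := by unfold Pre_getSingleStr; infer_instance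
def pvWitness_getSingleStr : String × Int := ("xabay", 2)

def Spec_getSingleStr (s : String) (i : Int) (out : String) : Prop := out = getSingleStr_alt s i
instance (s : String) (i : Int) (out : String) : Decidable (Spec_getSingleStr s i out) := by unfold Spec_getSingleStr; infer_instance

-- ===== CLAIM (what is proved, stated in full; the proofs are below) =====
def Claim_equal_getSingleStr : Prop := ∀ (s : String) (i : Int), Dom_getSingleStr s i → Pre_getSingleStr s i → Spec_getSingleStr s i (getSingleStr s i)

-- ===== LEMMAS AND PROOFS =====

-- One expansion step of the slice: prepend cs[m-1] and append cs[m+k].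
lemma pvSliceExtend (cs : List Char) (m k : Nat) (hm : 1 ≤ m) (hk : m + k < cs.length) :
    cs[m-1]'(by omega) :: ((cs.drop m).take k ++ [cs[m+k]'hk]) = (cs.drop (m-1)).take (k+2) := by
  have h1 : cs.drop (m-1) = cs[m-1]'(by omega) :: cs.drop m := by
    rw [List.drop_eq_getElem_cons (by omega : m - 1 < cs.length)]
    congr 2
    omega
  rw [h1, show k+2 = k+1+1 from rfl, List.take_succ_cons, List.take_add_one]
  have h2 : (cs.drop m)[k]? = some (cs[m+k]'hk) := by
    rw [List.getElem?_drop, List.getElem?_eq_getElem (by omega : m + k < cs.length)]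
  rw [h2]
  rfl

-- The radius returned by loop B stays within the string.
lemma pvLoopB_bounds (cs : List Char) (i : Int) :
    ∀ (fuel : Nat) (r : Int), 0 ≤ r → r ≤ i → i + r < (cs.length : Int) →
      0 ≤ pvLoopB cs i fuel r ∧ pvLoopB cs i fuel r ≤ i ∧
        i + pvLoopB cs i fuel r < (cs.length : Int) := by
  intro fuel
  induction fuel with
  | zero => intro r h1 h2 h3; exact ⟨h1, h2, h3⟩
  | succ fuel ih =>
    intro r h1 h2 h3
    rw [pvLoopB]
    split_ifs with hc
    · exact ih (r+1) (by omega) (by omega) (by omega)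
    · exact ⟨h1, h2, h3⟩

-- Main loop invariant: if ns is the slice of radius r, loop A produces the slice
-- of radius pvLoopB … r.
lemma pvLoopAB (cs : List Char) (i : Int) (h0 : 0 ≤ i) (hi : i < (cs.length : Int)) :
    ∀ (fuel : Nat) (r : Int) (ns : List Char), 0 ≤ r → r ≤ i →
      ns = (cs.drop (i - r).toNat).take (2 * r.toNat + 1) →
      pvLoopA cs i fuel (r + 1) ns =
        (cs.drop (i - pvLoopB cs i fuel r).toNat).take (2 * (pvLoopB cs i fuel r).toNat + 1) := by
  intro fuel
  induction fuel with
  | zero => intro r ns _ _ hns; simpa [pvLoopA, pvLoopB] using hns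
  | succ fuel ih =>
    intro r ns hr hri hns
    rw [pvLoopA, pvLoopB]
    have harith : (i - (r+1) ≥ 0 ∧ i + (r+1) < (cs.length : Int)) ↔
        (i - r - 1 ≥ 0 ∧ i + r + 1 < (cs.length : Int)) := by constructor <;> (intro h; omega)
    by_cases hc : i - r - 1 ≥ 0 ∧ i + r + 1 < (cs.length : Int)
    · have hA : PySem.List.pyGet? cs (i - r - 1) = some (cs[(i-r-1).toNat]'(by omega)) :=
        PySem.List.pyGet?_eq_some_getElem cs (by omega) (by omega)
      have hB : PySem.List.pyGet? cs (i + r + 1) = some (cs[(i+r+1).toNat]'(by omega)) :=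
        PySem.List.pyGet?_eq_some_getElem cs (by omega) (by omega)
      have hA' : PySem.List.pyGet? cs (i - (r+1)) = some (cs[(i-r-1).toNat]'(by omega)) := by
        rw [show i - (r+1) = i - r - 1 from by ring]; exact hA
      have hB' : PySem.List.pyGet? cs (i + (r+1)) = some (cs[(i+r+1).toNat]'(by omega)) := by
        rw [show i + (r+1) = i + r + 1 from by ring]; exact hB
      rw [if_pos (harith.mpr hc), hA', hB']
      simp only
      by_cases heq : cs[(i-r-1).toNat]'(by omega) = cs[(i+r+1).toNat]'(by omega)
      · rw [if_pos heq, if_pos ⟨hc.1, hc.2, by rw [hA, hB, heq]⟩]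
        refine ih (r + 1) _ (by omega) (by omega) ?_
        have hm1 : (1:Nat) ≤ (i - r).toNat := by omega
        have hmk : (i - r).toNat + (2 * r.toNat + 1) < cs.length := by omega
        have hext := pvSliceExtend cs (i - r).toNat (2 * r.toNat + 1) hm1 hmk
        rw [hns, show (i - (r+1)).toNat = (i - r).toNat - 1 from by omega,
            show 2 * (r+1).toNat + 1 = 2 * r.toNat + 1 + 2 from by omega, ← hext,
            getElem_congr rfl (show (i-r-1).toNat = (i-r).toNat - 1 from by omega) (by omega),
            getElem_congr rfl (show (i+r+1).toNat = (i-r).toNat + (2 * r.toNat + 1) from by omega) (by omega)]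
      · rw [if_neg heq, if_neg (by
            intro h
            have h2 := h.2.2
            rw [hA, hB] at h2
            exact heq (Option.some.inj h2))]
        exact hns
    · rw [if_neg (fun h => hc (harith.mp h)), if_neg (fun h => hc ⟨h.1, h.2.1⟩)]
      exact hns

-- xs[a:a] is empty for every a.
lemma pvSliceSame (cs : List Char) (a : Int) :
    PySem.List.slice cs (some a) (some a) = [] := by
  simp [PySem.List.slice]

-- Joining the left slice, the center and the right slice gives the full window.
lemma pvSliceJoin (cs : List Char) (m k : Nat) (hk : m + k < cs.length) :
    (cs.drop m).take k ++ cs[m+k]'hk :: (cs.drop (m+k+1)).take k = (cs.drop m).take (2*k+1) := by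
  rw [show 2*k+1 = k + (k+1) from by omega, List.take_add]
  congr 1
  rw [List.drop_drop, List.drop_eq_getElem_cons (by omega : m + k < cs.length),
      List.take_succ_cons]

-- ===== VERDICT (by name: the statement is the Claim_ definition above) =====
theorem getSingleStr_spec : Claim_equal_getSingleStr := by
  intro s i _ hpre
  obtain ⟨hlo, hhi⟩ := hpre
  unfold Spec_getSingleStr getSingleStr getSingleStr_alt
  by_cases h0 : 0 ≤ i
  · -- 0 ≤ i < len(s): the two loops run in lockstep (pvLoopAB)
    have hi : i < (s.toList.length : Int) := hhi
    have hget : PySem.Str.pyGet? s i = some (s.toList[i.toNat]'(by omega)) := by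
      simp only [PySem.Str.pyGet?]
      exact PySem.List.pyGet?_eq_some_getElem s.toList h0 hi
    rw [hget]
    simp only
    have hinv : [s.toList[i.toNat]'(by omega)] = (s.toList.drop (i - 0).toNat).take (2 * (0:Int).toNat + 1) := by
      rw [show (i - 0).toNat = i.toNat from by omega,
          List.drop_eq_getElem_cons (by omega : i.toNat < s.toList.length)]
      rfl
    have hAB := pvLoopAB s.toList i h0 hi s.toList.length 0 [s.toList[i.toNat]'(by omega)]
      le_rfl h0 hinv
    rw [show (0:Int) + 1 = 1 by ring] at hAB
    rw [hAB]
    set r := pvLoopB s.toList i s.toList.length 0 with hr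
    have hrb : 0 ≤ r ∧ r ≤ i ∧ i + r < (s.toList.length : Int) :=
      pvLoopB_bounds s.toList i s.toList.length 0 le_rfl h0 (by omega)
    rw [PySem.List.slice_toNat s.toList (by omega : (0:Int) ≤ i - r) h0,
        PySem.List.slice_toNat s.toList (by omega : (0:Int) ≤ i + 1) (by omega : (0:Int) ≤ i + r + 1),
        show i.toNat - (i - r).toNat = r.toNat from by omega,
        show (i + 1).toNat = (i - r).toNat + r.toNat + 1 from by omega,
        show (i + r + 1).toNat - ((i - r).toNat + r.toNat + 1) = r.toNat from by omega]
    rw [List.append_assoc, List.singleton_append,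
        getElem_congr rfl (show i.toNat = (i - r).toNat + r.toNat from by omega) (by omega),
        pvSliceJoin s.toList (i - r).toNat r.toNat (by omega),
        show (i - r).toNat = (i - r).toNat from rfl]
  · -- -len(s) ≤ i ≤ -1: neither loop runs; both sides return the single wrapped character
    have hlen : 1 ≤ s.toList.length := by omega
    cases hget : PySem.Str.pyGet? s i with
    | none =>
        exfalso
        simp only [PySem.Str.pyGet?, PySem.Chars.pyGet?_eq_listPyGet?] at hget
        rw [show i = -((-i).toNat : Int) from by omega,
            PySem.List.pyGet?_neg_natCast s.toList (-i).toNat (by omega) (by omega)] at hget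
        rw [List.getElem?_eq_getElem (show s.toList.length - (-i).toNat < s.toList.length by omega)] at hget
        exact absurd hget (by simp)
    | some c =>
        simp only
        obtain ⟨f, hf⟩ : ∃ f, s.toList.length = f + 1 := ⟨s.toList.length - 1, by omega⟩
        have hA : pvLoopA s.toList i s.toList.length 1 [c] = [c] := by
          rw [hf, pvLoopA, if_neg (fun h => absurd h.1 (by omega))]
        have hB : pvLoopB s.toList i s.toList.length 0 = 0 := by
          rw [hf, pvLoopB, if_neg (fun h => absurd h.1 (by omega))]
        rw [hA, hB, show i - 0 = i from by ring, show i + 0 + 1 = i + 1 from by ring,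
            pvSliceSame s.toList i, pvSliceSame s.toList (i + 1)]
        rfl
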